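-- pv_equiv track=rewrite | github.com/hariV0078/Arivara_main_websocket | arivara_researcher/skills/deep_research.py | trim_context_to_word_limit
-- ===== SOURCE A (Python) =====
-- from typing import List, Dict, Any, Optional, Set
--
-- MAX_CONTEXT_WORDS = 50000
--
-- def count_words(text: str) -> int:
--     """Count words in a text string"""
--     return len(text.split())
--
-- def trim_context_to_word_limit(context_list: List[str], max_words: int = MAX_CONTEXT_WORDS) -> List[str]:
--     """Trim context list to stay within word limit while preserving most recent/relevant items"""
--     total_words = 0
--     trimmed_context = []
--
--     # Process in reverse to keep most recent items
--     for item in reversed(context_list):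
--         words = count_words(item)
--         if total_words + words <= max_words:
--             trimmed_context.insert(0, item)  # Insert at start to maintain original order
--             total_words += words
--         else:
--             break
--
--     return trimmed_context
-- ===== SOURCE B (Python) =====
-- from bisect import bisect_right
-- from itertools import accumulate
-- from typing import List
--
-- MAX_CONTEXT_WORDS = 50000
--
-- def trim_context_to_word_limit(context_list: List[str], max_words: int = MAX_CONTEXT_WORDS) -> List[str]:
--     """Keep the longest suffix (most recent items) whose total word count fits max_words."""
--     cumulative = list(accumulate(len(item.split()) for item in reversed(context_list)))
--     k = bisect_right(cumulative, max_words)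
--     return context_list[len(context_list) - k:]
-- ===== Notes on version B (the rewrite author's own statement) =====
-- stated objective: faster
-- what changed: Replaces the reverse accumulate-and-break loop that builds the result by repeated insert(0) with a prefix-sum table over the reversed word counts plus a bisect_right binary search for the cutoff, returning the fitting suffix with one slice.
import Mathlib
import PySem

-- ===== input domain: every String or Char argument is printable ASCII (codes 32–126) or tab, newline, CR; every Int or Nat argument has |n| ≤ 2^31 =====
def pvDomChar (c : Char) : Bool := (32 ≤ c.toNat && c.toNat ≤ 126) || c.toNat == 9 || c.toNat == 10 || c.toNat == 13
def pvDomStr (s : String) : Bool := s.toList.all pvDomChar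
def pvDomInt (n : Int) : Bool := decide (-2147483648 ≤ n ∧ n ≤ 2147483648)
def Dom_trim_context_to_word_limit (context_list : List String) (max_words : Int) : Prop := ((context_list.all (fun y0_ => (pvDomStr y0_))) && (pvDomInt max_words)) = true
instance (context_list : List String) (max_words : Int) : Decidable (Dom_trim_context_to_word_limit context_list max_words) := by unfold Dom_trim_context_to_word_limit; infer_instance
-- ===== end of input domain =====

-- B replaces A's reverse accumulate-and-break loop (with insert(0)) by a prefix-sum table over
-- the reversed per-item word counts plus a bisect_right search for the cutoff, then one slice.


-- ===== PORT A =====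
-- count_words(text) = len(text.split())
def count_words (text : String) : Int := ((PySem.Str.split₀ text).length : Int)

-- the 'for item in reversed(context_list): … else break' loop; trimmed_context.insert(0, item) = item :: trimmed
def trimLoopA : List String → Int → Int → List String → List String
  | [], _, _, trimmed => trimmed
  | item :: rest, max_words, total_words, trimmed =>
      let words := count_words item
      if total_words + words ≤ max_words then
        trimLoopA rest max_words (total_words + words) (item :: trimmed)
      else trimmed

def trim_context_to_word_limit (context_list : List String) (max_words : Int) : List String :=
  trimLoopA context_list.reverse max_words 0 []

-- ===== PORT B =====
-- itertools.accumulate of the running totals, from a running start t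
def cumAcc : List Int → Int → List Int
  | [], _ => []
  | w :: rest, t => (t + w) :: cumAcc rest (t + w)

def trim_context_to_word_limit_alt (context_list : List String) (max_words : Int) : List String :=
  let cumulative := cumAcc (context_list.reverse.map (fun item => ((PySem.Str.split₀ item).length : Int))) 0
  let k := PySem.List.bisectRight cumulative max_words
  PySem.List.slice context_list (some ((context_list.length : Int) - (k : Int))) none

-- ===== PRECONDITION & SPEC =====
def Spec_trim_context_to_word_limit (context_list : List String) (max_words : Int) (out : List String) : Prop := out = trim_context_to_word_limit_alt context_list max_words
instance (context_list : List String) (max_words : Int) (out : List String) : Decidable (Spec_trim_context_to_word_limit context_list max_words out) := by unfold Spec_trim_context_to_word_limit; infer_instance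

-- ===== CLAIM (what is proved, stated in full; the proofs are below) =====
def Claim_equal_trim_context_to_word_limit : Prop := ∀ (context_list : List String) (max_words : Int), Dom_trim_context_to_word_limit context_list max_words → Spec_trim_context_to_word_limit context_list max_words (trim_context_to_word_limit context_list max_words)

-- ===== LEMMAS AND PROOFS =====

-- length of the prefix of the (reversed) weight list that A's loop accepts
def fitLen : List Int → Int → Int → Nat
  | [], _, _ => 0
  | w :: rest, mw, t => if t + w ≤ mw then fitLen rest mw (t + w) + 1 else 0

theorem trimLoopA_eq_fit (l : List String) (mw t : Int) (acc : List String) :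
    trimLoopA l mw t acc =
      (l.take (fitLen (l.map count_words) mw t)).reverse ++ acc := by
  induction l generalizing t acc with
  | nil => simp [trimLoopA, fitLen]
  | cons x r ih =>
      simp only [trimLoopA, List.map_cons, fitLen]
      split_ifs with h
      · rw [ih]; simp
      · simp

theorem fitLen_le_length (ws : List Int) (mw t : Int) : fitLen ws mw t ≤ ws.length := by
  induction ws generalizing t with
  | nil => simp [fitLen]
  | cons w r ih =>
      simp only [fitLen, List.length_cons]
      split_ifs with h
      · exact Nat.succ_le_succ (ih _)
      · omega

theorem cumAcc_length (ws : List Int) (t : Int) : (cumAcc ws t).length = ws.length := by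
  induction ws generalizing t with
  | nil => rfl
  | cons w r ih => simp [cumAcc, ih]

theorem cumAcc_ge (ws : List Int) (t : Int) (h : ∀ w ∈ ws, 0 ≤ w)
    (j : Nat) (hj : j < (cumAcc ws t).length) : t ≤ (cumAcc ws t)[j] := by
  induction ws generalizing t j with
  | nil => simp [cumAcc] at hj
  | cons w r ih =>
      have hw : 0 ≤ w := h w (by simp)
      cases j with
      | zero => simp [cumAcc]; omega
      | succ j' =>
          simp only [cumAcc] at hj ⊢
          have := ih (t + w) (fun x hx => h x (by simp [hx])) j' (by simpa using hj)
          simpa using le_trans (by omega) this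

theorem cumAcc_pairwise (ws : List Int) (t : Int) (h : ∀ w ∈ ws, 0 ≤ w) :
    (cumAcc ws t).Pairwise (fun a b => a ≤ b) := by
  induction ws generalizing t with
  | nil => simp [cumAcc]
  | cons w r ih =>
      simp only [cumAcc, List.pairwise_cons]
      refine ⟨fun b hb => ?_, ih (t + w) (fun x hx => h x (by simp [hx]))⟩
      obtain ⟨j, hj, rfl⟩ := List.getElem_of_mem hb
      exact cumAcc_ge r (t + w) (fun x hx => h x (by simp [hx])) j hj

theorem fitLen_lt (ws : List Int) (mw t : Int) (j : Nat) (hj : j < (cumAcc ws t).length)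
    (hlt : j < fitLen ws mw t) : (cumAcc ws t)[j] ≤ mw := by
  induction ws generalizing t j with
  | nil => simp [fitLen] at hlt
  | cons w r ih =>
      simp only [fitLen] at hlt
      split_ifs at hlt with h
      · cases j with
        | zero => simpa [cumAcc] using h
        | succ j' =>
            simp only [cumAcc] at hj ⊢
            simpa using ih (t + w) j' (by simpa using hj) (by omega)
      · omega

theorem fitLen_ge (ws : List Int) (mw t : Int) (h0 : ∀ w ∈ ws, 0 ≤ w)
    (j : Nat) (hj : j < (cumAcc ws t).length)
    (hge : fitLen ws mw t ≤ j) : mw < (cumAcc ws t)[j] := by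
  induction ws generalizing t j with
  | nil => simp [cumAcc] at hj
  | cons w r ih =>
      simp only [fitLen] at hge
      split_ifs at hge with h
      · cases j with
        | zero => omega
        | succ j' =>
            simp only [cumAcc] at hj ⊢
            simpa using ih (t + w) (fun x hx => h0 x (by simp [hx])) j' (by simpa using hj) (by omega)
      · push Not at h
        cases j with
        | zero => simpa [cumAcc] using h
        | succ j' =>
            simp only [cumAcc] at hj ⊢
            have := cumAcc_ge r (t + w) (fun x hx => h0 x (by simp [hx])) j' (by simpa using hj)
            simp only [List.getElem_cons_succ]
            omega

theorem bisect_eq_fit (ws : List Int) (mw t : Int) (h0 : ∀ w ∈ ws, 0 ≤ w) :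
    PySem.List.bisectRight (cumAcc ws t) mw = fitLen ws mw t := by
  obtain ⟨hle, hlo, hhi⟩ := PySem.List.bisectRight_spec (cumAcc ws t) mw (cumAcc_pairwise ws t h0)
  set k := PySem.List.bisectRight (cumAcc ws t) mw with hk
  have hfle : fitLen ws mw t ≤ ws.length := fitLen_le_length ws mw t
  have hlen := cumAcc_length ws t
  by_contra hne
  rcases Nat.lt_or_ge k (fitLen ws mw t) with hc | hc
  · have hjk : k < (cumAcc ws t).length := by omega
    have h1 := fitLen_lt ws mw t k hjk hc
    have h2 := hhi k hjk (le_refl k)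
    omega
  · have hflt : fitLen ws mw t < k := by omega
    have hjf : fitLen ws mw t < (cumAcc ws t).length := by omega
    have h1 := fitLen_ge ws mw t h0 (fitLen ws mw t) hjf (le_refl _)
    have h2 := hlo (fitLen ws mw t) hjf hflt
    omega

theorem count_words_nonneg (s : String) : 0 ≤ count_words s := by
  simp [count_words]

-- ===== VERDICT (by name: the statement is the Claim_ definition above) =====
theorem trim_context_to_word_limit_spec : Claim_equal_trim_context_to_word_limit := by
  intro cl mw _
  unfold Spec_trim_context_to_word_limit trim_context_to_word_limit trim_context_to_word_limit_alt
  set ws := cl.reverse.map (fun item => ((PySem.Str.split₀ item).length : Int)) with hws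
  have hwseq : cl.reverse.map count_words = ws := rfl
  have h0 : ∀ w ∈ ws, 0 ≤ w := by
    intro w hw
    simp only [hws, List.mem_map] at hw
    obtain ⟨s, _, rfl⟩ := hw
    exact count_words_nonneg s
  have hk : PySem.List.bisectRight (cumAcc ws 0) mw = fitLen ws mw 0 :=
    bisect_eq_fit ws mw 0 h0
  set p := fitLen ws mw 0 with hp
  have hple : p ≤ cl.length := by
    have h1 := fitLen_le_length ws mw 0
    have h2 : ws.length = cl.length := by simp [hws]
    omega
  rw [trimLoopA_eq_fit, hwseq, ← hp]
  show _ = PySem.List.slice cl (some ((cl.length : Int) - (PySem.List.bisectRight (cumAcc ws 0) mw : Int))) none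
  rw [hk]
  have hnn : (0:Int) ≤ (cl.length : Int) - (p : Int) := by
    omega
  rw [PySem.List.slice_from cl hnn]
  have htn : (((cl.length : Int) - (p : Int))).toNat = cl.length - p := Int.toNat_sub _ _
  rw [htn, List.append_nil, List.take_reverse, List.reverse_reverse]
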